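-- pv_equiv track=rewrite | github.com/yakubauskaitemarianna/transaction | transaction.py | count_unique_ids
-- ===== SOURCE A (Python) =====
-- def count_unique_ids(data):
--     count = 0
--     dublicated = []
--
--     for i in range(1, len(data), 4):
--         coeff = data.count(data[i])
--         if  coeff != 1 and (data[i] not in dublicated):
--             count += coeff
--             dublicated.append(data[i])
--         elif coeff == 1 and (data[i] not in dublicated):
--             count += 1
--     return count
-- ===== SOURCE B (Python) =====
-- def count_unique_ids(data):
--     targets = set()
--     for i in range(1, len(data), 4):
--         targets.add(data[i])
--     return sum(1 for x in data if x in targets)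
-- ===== Notes on version B (the rewrite author's own statement) =====
-- stated objective: faster
-- what changed: Instead of calling data.count at every 4th index with a duplicate-tracking list, B builds the set of values at indices 1,5,9,... once and then counts in a single pass how many elements of data belong to that set.
import Mathlib
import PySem

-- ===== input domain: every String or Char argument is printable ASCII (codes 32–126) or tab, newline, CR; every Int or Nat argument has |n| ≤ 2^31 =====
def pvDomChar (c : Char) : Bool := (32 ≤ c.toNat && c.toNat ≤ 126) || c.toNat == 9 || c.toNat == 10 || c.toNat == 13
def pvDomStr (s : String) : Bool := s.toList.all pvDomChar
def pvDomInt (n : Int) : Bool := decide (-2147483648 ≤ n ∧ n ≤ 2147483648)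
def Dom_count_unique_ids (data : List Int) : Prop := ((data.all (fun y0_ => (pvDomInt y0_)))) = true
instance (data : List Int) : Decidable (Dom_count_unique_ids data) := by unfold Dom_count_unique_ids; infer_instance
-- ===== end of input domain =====

-- B replaces A's per-index data.count scans with a build-the-target-set-once, then
-- count-memberships-in-one-pass decomposition (objective: faster, O(n^2) → O(n·m) scans removed).

-- ===== PORT A =====
-- literal port of A: loop over range(1, len(data), 4); indices produced by this range are
-- always in bounds, so pyGetD with default 0 is exact here (data[i] never raises).
def count_unique_ids (data : List Int) : Int :=
  (List.foldl
    (fun (s : Int × List Int) (i : Int) =>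
      let v := PySem.List.pyGetD data i 0
      let coeff : Int := (data.count v : Int)
      if coeff ≠ 1 ∧ v ∉ s.2 then (s.1 + coeff, s.2 ++ [v])
      else if coeff = 1 ∧ v ∉ s.2 then (s.1 + 1, s.2)
      else s)
    ((0 : Int), ([] : List Int))
    (PySem.List.pyRange 1 (PySem.List.len data) 4)).1

-- ===== PORT B =====
-- literal port of B: build targets = set of data[i] for i in range(1, len(data), 4),
-- then sum(1 for x in data if x in targets).
def count_unique_ids_alt (data : List Int) : Int :=
  let targets : PySem.Set Int :=
    List.foldl (fun s i => PySem.Set.add s (PySem.List.pyGetD data i 0))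
      PySem.Set.empty (PySem.List.pyRange 1 (PySem.List.len data) 4)
  (data.map (fun x => if PySem.Set.contains targets x then (1 : Int) else 0)).sum

-- ===== PRECONDITION & SPEC =====
def Spec_count_unique_ids (data : List Int) (out : Int) : Prop := out = count_unique_ids_alt data
instance (data : List Int) (out : Int) : Decidable (Spec_count_unique_ids data out) := by unfold Spec_count_unique_ids; infer_instance

-- ===== CLAIM (what is proved, stated in full; the proofs are below) =====
def Claim_equal_count_unique_ids : Prop := ∀ (data : List Int), Dom_count_unique_ids data → Spec_count_unique_ids data (count_unique_ids data)

-- ===== LEMMAS AND PROOFS =====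

-- the list of values A inspects: data[1], data[5], data[9], …
def pvVals (data : List Int) : List Int :=
  (PySem.List.pyRange 1 (PySem.List.len data) 4).map (fun i => PySem.List.pyGetD data i 0)

-- the inspected values form a sublist of data (indices are strictly increasing and in bounds)
lemma pvVals_sublist (data : List Int) : (pvVals data).Sublist data := by
  have hb : ∀ i ∈ PySem.List.pyRange 1 (PySem.List.len data) 4, 1 ≤ i ∧ i < (data.length : Int) := by
    intro i hi
    have := (PySem.List.mem_pyRange_iff_of_pos (a := 1) (b := PySem.List.len data) (s := 4) (by norm_num) i).mp hi
    exact ⟨this.1, this.2.1⟩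
  have hpr := PySem.List.pyRange_of_pos 1 (PySem.List.len data) (s := 4) (by norm_num)
  have H : ∀ k ∈ List.range (if (1:Int) < PySem.List.len data then (((PySem.List.len data) - 1 + 4 - 1) / 4).toNat else 0),
      1 + 4 * k < data.length := by
    intro k hk
    have hmem : ((1 : Int) + 4 * (k : Int)) ∈ PySem.List.pyRange 1 (PySem.List.len data) 4 := by
      rw [hpr]; exact List.mem_map_of_mem hk
    have := (hb _ hmem).2
    omega
  have hsub := List.map_getElem_sublist (l := data)
    (is := (List.range (if (1:Int) < PySem.List.len data then (((PySem.List.len data) - 1 + 4 - 1) / 4).toNat else 0)).pmap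
      (fun k hk => (⟨1 + 4 * k, hk⟩ : Fin data.length)) H)
    (by
      rw [List.pairwise_pmap]
      refine List.Pairwise.imp ?_ List.pairwise_lt_range
      intro k1 k2 hlt h1 h2
      simp only [Fin.mk_lt_mk]
      omega)
  have heq : (((List.range (if (1:Int) < PySem.List.len data then (((PySem.List.len data) - 1 + 4 - 1) / 4).toNat else 0)).pmap
      (fun k hk => (⟨1 + 4 * k, hk⟩ : Fin data.length)) H).map (fun x => data[x])) = pvVals data := by
    rw [List.map_pmap]
    unfold pvVals
    rw [hpr, List.map_map]
    rw [List.pmap_congr_left _ (q := fun _ => True) (g := fun k _ =>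
      ((fun i => PySem.List.pyGetD data i 0) ∘ fun k : Nat => (1 : Int) + 4 * (k : Int)) k)
      (H₂ := fun a _ => trivial) ?_]
    · exact List.pmap_eq_map _
    · intro k hk h1 _
      have hcast : ((1 : Int) + 4 * (k : Int)) = ((1 + 4 * k : Nat) : Int) := by push_cast; ring
      simp only [Function.comp, hcast, PySem.List.pyGetD_natCast]
      exact (List.getD_eq_getElem data 0 h1).symm
  rw [← heq]
  exact hsub

-- counting members of tg ++ [v] when v is new
lemma countP_append_singleton (data tg : List Int) (v : Int) (hv : v ∉ tg) :
    data.countP (fun x => decide (x ∈ tg ++ [v])) =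
      data.countP (fun x => decide (x ∈ tg)) + data.count v := by
  induction data with
  | nil => simp
  | cons a d ih =>
    by_cases hav : a = v
    · subst hav
      rw [List.countP_cons_of_pos (by simp),
          List.countP_cons_of_neg (by simpa using hv), List.count_cons_self, ih]
      omega
    · rw [List.count_cons_of_ne hav]
      by_cases hm : a ∈ tg
      · rw [List.countP_cons_of_pos (by simp [hm]),
            List.countP_cons_of_pos (by simpa using hm), ih]
        omega
      · rw [List.countP_cons_of_neg (by simp [hm, hav]),
            List.countP_cons_of_neg (by simpa using hm), ih]

-- main loop invariant: folding A's body over a value list l (whose count-1 values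
-- occur at most once and never already lie in tg) yields the number of elements of
-- data whose value lies in the set built by folding Set.add over l from tg.
lemma pvLoop (data : List Int) :
    ∀ (l : List Int) (c : Int) (dub tg : List Int),
      c = (data.countP (fun x => decide (x ∈ tg)) : Int) →
      (∀ v, v ∈ dub ↔ (v ∈ tg ∧ data.count v ≠ 1)) →
      (∀ v, data.count v = 1 → v ∈ tg → v ∉ l) →
      (∀ v, data.count v = 1 → l.count v ≤ 1) →
      (List.foldl
        (fun (s : Int × List Int) (v : Int) =>
          let coeff : Int := (data.count v : Int)
          if coeff ≠ 1 ∧ v ∉ s.2 then (s.1 + coeff, s.2 ++ [v])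
          else if coeff = 1 ∧ v ∉ s.2 then (s.1 + 1, s.2)
          else s)
        (c, dub) l).1
      = (data.countP (fun x => decide (x ∈ List.foldl PySem.Set.add tg l)) : Int) := by
  intro l
  induction l with
  | nil => intro c dub tg h1 _ _ _; simpa using h1
  | cons v l' ih =>
    intro c dub tg h1 h2 h3 h4
    simp only [List.foldl_cons]
    by_cases hdub : v ∈ dub
    · have hvc : data.count v ≠ 1 := by
        intro h; exact ((h2 v).mp hdub).2 (by exact_mod_cast h)
      have hvtg : v ∈ tg := ((h2 v).mp hdub).1
      have hadd : PySem.Set.add tg v = tg := by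
        simp [PySem.Set.add, PySem.Set.contains, List.contains_eq_mem, hvtg]
      rw [if_neg (by simp [hdub]), if_neg (by simp [hdub])]
      simp only [hadd]
      exact ih c dub tg h1 h2
        (fun w hw hwt => fun hm => h3 w hw hwt (List.mem_cons_of_mem _ hm))
        (fun w hw => le_trans (List.count_le_count_cons ..) (h4 w hw))
    · by_cases hvc : (data.count v : Int) = 1
      · have hvc' : data.count v = 1 := by exact_mod_cast hvc
        have hvtg : v ∉ tg := fun h => (h3 v hvc' h) List.mem_cons_self
        have hadd : PySem.Set.add tg v = tg ++ [v] := by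
          simp [PySem.Set.add, PySem.Set.contains, List.contains_eq_mem, hvtg]
        rw [if_neg (by simp [hvc]), if_pos ⟨hvc, hdub⟩]
        simp only [hadd]
        have hnotl' : v ∉ l' := by
          have := h4 v hvc'
          rw [List.count_cons_self] at this
          exact List.count_eq_zero.mp (by omega)
        refine ih (c + 1) dub (tg ++ [v]) ?_ ?_ ?_ ?_
        · rw [countP_append_singleton data tg v hvtg, h1, hvc']
          push_cast; ring
        · intro w
          constructor
          · intro hw
            rcases (h2 w).mp hw with ⟨hwt, hwc⟩
            exact ⟨List.mem_append_left _ hwt, hwc⟩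
          · rintro ⟨hwt, hwc⟩
            rcases List.mem_append.mp hwt with h | h
            · exact (h2 w).mpr ⟨h, hwc⟩
            · simp at h; subst h; exact absurd hvc' hwc
        · intro w hw hwt
          rcases List.mem_append.mp hwt with h | h
          · exact fun hm => h3 w hw h (List.mem_cons_of_mem _ hm)
          · simp at h; subst h; exact hnotl'
        · intro w hw
          exact le_trans (List.count_le_count_cons ..) (h4 w hw)
      · have hvtg : v ∉ tg := fun h => hdub ((h2 v).mpr ⟨h, fun hc => hvc (by exact_mod_cast hc)⟩)
        have hadd : PySem.Set.add tg v = tg ++ [v] := by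
          simp [PySem.Set.add, PySem.Set.contains, List.contains_eq_mem, hvtg]
        rw [if_pos ⟨hvc, hdub⟩]
        simp only [hadd]
        refine ih (c + (data.count v : Int)) (dub ++ [v]) (tg ++ [v]) ?_ ?_ ?_ ?_
        · rw [countP_append_singleton data tg v hvtg, h1]
          push_cast; ring
        · intro w
          constructor
          · intro hw
            rcases List.mem_append.mp hw with h | h
            · rcases (h2 w).mp h with ⟨hwt, hwc⟩
              exact ⟨List.mem_append_left _ hwt, hwc⟩
            · simp at h; subst h
              exact ⟨List.mem_append_right _ (by simp), fun hc => hvc (by exact_mod_cast hc)⟩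
          · rintro ⟨hwt, hwc⟩
            rcases List.mem_append.mp hwt with h | h
            · exact List.mem_append_left _ ((h2 w).mpr ⟨h, hwc⟩)
            · simp at h; subst h; exact List.mem_append_right _ (by simp)
        · intro w hw hwt
          rcases List.mem_append.mp hwt with h | h
          · exact fun hm => h3 w hw h (List.mem_cons_of_mem _ hm)
          · simp at h; subst h
            have := h4 w hw
            rw [List.count_cons_self] at this
            exact List.count_eq_zero.mp (by omega)
        · intro w hw
          exact le_trans (List.count_le_count_cons ..) (h4 w hw)

-- ===== VERDICT (by name: the statement is the Claim_ definition above) =====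
theorem count_unique_ids_spec : Claim_equal_count_unique_ids := by
  intro data _
  unfold Spec_count_unique_ids count_unique_ids count_unique_ids_alt
  have hA : (List.foldl
      (fun (s : Int × List Int) (i : Int) =>
        let v := PySem.List.pyGetD data i 0
        let coeff : Int := (data.count v : Int)
        if coeff ≠ 1 ∧ v ∉ s.2 then (s.1 + coeff, s.2 ++ [v])
        else if coeff = 1 ∧ v ∉ s.2 then (s.1 + 1, s.2)
        else s)
      ((0 : Int), ([] : List Int))
      (PySem.List.pyRange 1 (PySem.List.len data) 4))
      = (List.foldl
      (fun (s : Int × List Int) (v : Int) =>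
        let coeff : Int := (data.count v : Int)
        if coeff ≠ 1 ∧ v ∉ s.2 then (s.1 + coeff, s.2 ++ [v])
        else if coeff = 1 ∧ v ∉ s.2 then (s.1 + 1, s.2)
        else s)
      ((0 : Int), ([] : List Int)) (pvVals data)) := by
    rw [pvVals, List.foldl_map]
  have hB : (List.foldl (fun s i => PySem.Set.add s (PySem.List.pyGetD data i 0))
      PySem.Set.empty (PySem.List.pyRange 1 (PySem.List.len data) 4))
      = List.foldl PySem.Set.add ([] : List Int) (pvVals data) := by
    rw [pvVals, List.foldl_map]; rfl
  rw [hA, hB]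
  have hloop := pvLoop data (pvVals data) 0 [] []
    (by simp) (by simp) (by simp)
    (fun w hw => le_trans ((pvVals_sublist data).count_le w) (le_of_eq hw))
  rw [hloop]
  rw [PySem.List.sum_map_ite_one_zero]
  congr 1
  apply List.countP_congr
  intro x _
  simp [PySem.Set.contains, List.contains_eq_mem]
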